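-- pv_equiv track=rewrite | github.com/Denis-zx/Ficsum_New | run_experiment_V3.py | get_error_distance
-- ===== SOURCE A (Python) =====
-- def get_error_distance(data_stream):
--     prev_error_idx = -1
--     error_distances = []
--     for i,err in enumerate(data_stream["predict_corr"]):
--         if err:
--             if prev_error_idx == -1:
--                 prev_error_idx = i
--             else:
--                 distance = i - prev_error_idx
--                 error_distances.append(distance)
--                 prev_error_idx = i
--     if len(error_distances) == 0:
--         error_distances = [0]
--     return error_distances
-- ===== SOURCE B (Python) =====
-- def get_error_distance(data_stream):
--     # Run-length algorithm: encode the flag stream as a 0/1 string and split it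
--     # on '1'; each interior piece is a maximal run of non-errors between two
--     # consecutive errors, so that distance is the piece's length + 1.
--     bits = ''.join('1' if e else '0' for e in data_stream["predict_corr"])
--     gaps = [len(run) + 1 for run in bits.split('1')[1:-1]]
--     return gaps if gaps else [0]
-- ===== Notes on version B (the rewrite author's own statement) =====
-- stated objective: alternative
-- what changed: Replaced A's single enumerate scan with a prev-index sentinel by a run-length algorithm: encode the flags as a 0/1 string, split it on '1', and read each gap off as (length of the interior run) + 1.
-- outside the precondition, e.g. on get_error_distance({}): A raises KeyError, B raises KeyError
import Mathlib
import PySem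

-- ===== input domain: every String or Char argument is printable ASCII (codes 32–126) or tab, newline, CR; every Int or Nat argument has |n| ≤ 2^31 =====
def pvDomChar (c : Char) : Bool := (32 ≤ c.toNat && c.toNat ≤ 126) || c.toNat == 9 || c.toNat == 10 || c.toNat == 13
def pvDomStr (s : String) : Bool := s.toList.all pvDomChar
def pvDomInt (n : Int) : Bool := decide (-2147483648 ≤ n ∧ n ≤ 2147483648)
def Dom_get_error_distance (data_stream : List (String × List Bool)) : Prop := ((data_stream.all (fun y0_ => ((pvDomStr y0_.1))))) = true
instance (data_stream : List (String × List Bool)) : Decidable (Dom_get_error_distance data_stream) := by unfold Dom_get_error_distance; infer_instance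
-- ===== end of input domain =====

-- B replaces A's enumerate scan (prev-index sentinel, running diffs) by a run-length
-- algorithm: encode the flags as a 0/1 string, split on '1', gap = interior run length + 1
-- (objective: alternative algorithm, same asymptotic cost).

-- ===== PORT A =====
-- A's loop body: state (prev_error_idx, error_distances) folded over enumerate(flags).
def geaStep (st : Int × List Int) (p : Int × Bool) : Int × List Int :=
  if p.2 then
    if st.1 == -1 then (p.1, st.2)
    else (p.1, st.2 ++ [p.1 - st.1])
  else st

def get_error_distance (data_stream : List (String × List Bool)) : List Int :=
  match data_stream.lookup "predict_corr" with  -- dict lookup; KeyError (none) excluded by Pre_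
  | none => []
  | some xs =>
    let st := (PySem.List.enumerate xs).foldl geaStep (-1, [])
    if st.2.length == 0 then [0] else st.2

-- ===== PORT B =====
-- ''.join('1' if e else '0' for e in flags) is a join of single characters: exactly the char list.
def gedEnc (e : Bool) : Char := if e then '1' else '0'

def get_error_distance_alt (data_stream : List (String × List Bool)) : List Int :=
  match data_stream.lookup "predict_corr" with
  | none => []
  | some xs =>
    let bits : List Char := xs.map gedEnc                  -- ''.join(… for e in flags)
    let parts := PySem.Chars.splitOn bits ['1']            -- bits.split('1')
    let gaps := (PySem.List.slice parts (some 1) (some (-1))).map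
                  (fun run => PySem.Chars.len run + 1)     -- [len(run)+1 for run in parts[1:-1]]
    if gaps = [] then [0] else gaps                        -- gaps if gaps else [0]

-- ===== PRECONDITION & SPEC =====
-- Pre_: the key "predict_corr" must be present; otherwise A (and B) raise KeyError.
def Pre_get_error_distance (data_stream : List (String × List Bool)) : Prop :=
  (data_stream.lookup "predict_corr").isSome = true
instance (data_stream : List (String × List Bool)) : Decidable (Pre_get_error_distance data_stream) := by unfold Pre_get_error_distance; infer_instance
def pvWitness_get_error_distance : (List (String × List Bool)) := [("predict_corr", [true, false, true])]

def Spec_get_error_distance (data_stream : List (String × List Bool)) (out : List Int) : Prop := out = get_error_distance_alt data_stream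
instance (data_stream : List (String × List Bool)) (out : List Int) : Decidable (Spec_get_error_distance data_stream out) := by unfold Spec_get_error_distance; infer_instance

-- ===== CLAIM (what is proved, stated in full; the proofs are below) =====
def Claim_equal_get_error_distance : Prop := ∀ (data_stream : List (String × List Bool)), Dom_get_error_distance data_stream → Pre_get_error_distance data_stream → Spec_get_error_distance data_stream (get_error_distance data_stream)

-- ===== LEMMAS AND PROOFS =====

-- lengths of the maximal false-runs, in order, separated by the trues
def geaRuns : List Bool → Int → List Int
  | [], n => [n]
  | true :: r, n => n :: geaRuns r 0
  | false :: r, n => geaRuns r (n + 1)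

-- fuel-free model of PySem.Chars.splitOn.go with separator ['1']
def geaSplit : List Char → List Char → List (List Char) → List (List Char)
  | [], cur, acc => (cur.reverse :: acc).reverse
  | c :: rest, cur, acc =>
    if c = '1' then geaSplit rest [] (cur.reverse :: acc)
    else geaSplit rest (c :: cur) acc

theorem geaRuns_ne_nil (xs : List Bool) (n : Int) : geaRuns xs n ≠ [] := by
  induction xs generalizing n with
  | nil => simp [geaRuns]
  | cons b r ih => cases b <;> simp [geaRuns, ih]

theorem go_eq_geaSplit (l : List Char) (fuel : Nat) (cur : List Char)
    (acc : List (List Char)) (h : l.length < fuel) :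
    PySem.Chars.splitOn.go ['1'] fuel l cur acc = geaSplit l cur acc := by
  induction l generalizing fuel cur acc with
  | nil =>
    cases fuel with
    | zero => omega
    | succ f =>
      rw [PySem.Chars.splitOn.go]
      try rfl
      all_goals omega
  | cons c rest ih =>
    cases fuel with
    | zero => omega
    | succ f =>
      rw [PySem.Chars.splitOn.go]
      have hlen : rest.length < f := by simpa using h
      by_cases hc : c = '1'
      · simp [List.isPrefixOf, hc, geaSplit, ih _ _ _ hlen]
      · simp [List.isPrefixOf, Ne.symm hc, hc, geaSplit, ih _ _ _ hlen]

theorem splitOn_eq_geaSplit (bits : List Char) :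
    PySem.Chars.splitOn bits ['1'] = geaSplit bits [] [] := by
  rw [PySem.Chars.splitOn]
  exact go_eq_geaSplit bits (bits.length + 1) [] [] (by omega)

theorem geaSplit_lens (xs : List Bool) (cur : List Char) (acc : List (List Char)) :
    (geaSplit (xs.map gedEnc) cur acc).map PySem.Chars.len
      = acc.reverse.map PySem.Chars.len ++ geaRuns xs (cur.length : Int) := by
  induction xs generalizing cur acc with
  | nil => simp [geaSplit, geaRuns, PySem.Chars.len]
  | cons b r ih =>
    cases b with
    | true =>
      have h1 : gedEnc true = '1' := rfl
      simp only [List.map_cons, h1, geaRuns]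
      rw [show geaSplit ('1' :: r.map gedEnc) cur acc
            = geaSplit (r.map gedEnc) [] (cur.reverse :: acc) by
        simp [geaSplit]]
      rw [ih]
      simp [PySem.Chars.len]
    | false =>
      have h0 : gedEnc false = '0' := rfl
      simp only [List.map_cons, h0, geaSplit, geaRuns]
      rw [if_neg (by decide)]
      rw [ih]
      have hlen : ((('0' :: cur).length : Int)) = (cur.length : Int) + 1 := by
        push_cast [List.length_cons]; ring
      rw [hlen]

theorem enumerate_cons {α : Type} (x : α) (xs : List α) (s : Int) :
    PySem.List.enumerate (x :: xs) s = (s, x) :: PySem.List.enumerate xs (s + 1) := by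
  rw [PySem.List.enumerate]

-- A's fold after the first true flag: prev = j ≥ 0, d falses already seen in the current run
theorem fold_seen (rest : List Bool) (j d : Int) (acc : List Int)
    (hj : 0 ≤ j) (hd : 0 ≤ d) :
    ((PySem.List.enumerate rest (j + 1 + d)).foldl geaStep (j, acc)).2
      = acc ++ ((geaRuns rest d).dropLast).map (· + 1) := by
  induction rest generalizing j d acc with
  | nil => simp [geaRuns]
  | cons b r ih =>
    cases b with
    | true =>
      rw [enumerate_cons, List.foldl_cons]
      have hne : ((j : Int) == -1) = false := by
        rw [beq_eq_false_iff_ne]; omega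
      have hstep : geaStep (j, acc) (j + 1 + d, true)
          = (j + 1 + d, acc ++ [d + 1]) := by
        simp [geaStep, hne]
        ring
      rw [hstep]
      have harg : j + 1 + d + 1 = (j + 1 + d) + 1 + 0 := by ring
      rw [harg, ih (j + 1 + d) 0 (acc ++ [d + 1]) (by omega) le_rfl]
      rcases h : geaRuns r 0 with _ | ⟨y, ys⟩
      · exact absurd h (geaRuns_ne_nil r 0)
      · simp [geaRuns, h]
    | false =>
      rw [enumerate_cons, List.foldl_cons]
      have hstep : geaStep (j, acc) (j + 1 + d, false) = (j, acc) := by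
        simp [geaStep]
      rw [hstep]
      have harg : j + 1 + d + 1 = j + 1 + (d + 1) := by ring
      rw [harg, ih j (d + 1) acc hj (by omega)]
      simp [geaRuns]

-- A's fold from the initial sentinel state (no true seen yet)
theorem fold_start (xs : List Bool) (s c : Int) (hs : 0 ≤ s) :
    ((PySem.List.enumerate xs s).foldl geaStep (-1, [])).2
      = (((geaRuns xs c).tail).dropLast).map (· + 1) := by
  induction xs generalizing s c with
  | nil => simp [geaRuns]
  | cons b r ih =>
    cases b with
    | true =>
      rw [enumerate_cons, List.foldl_cons]
      have hstep : geaStep (-1, []) (s, true) = (s, []) := by simp [geaStep]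
      rw [hstep]
      have harg : s + 1 = s + 1 + 0 := by ring
      rw [harg, fold_seen r s 0 [] hs le_rfl]
      simp [geaRuns]
    | false =>
      rw [enumerate_cons, List.foldl_cons]
      have hstep : geaStep (-1, []) (s, false) = (-1, []) := by simp [geaStep]
      rw [hstep]
      rw [ih (s + 1) (c + 1) (by omega)]
      simp [geaRuns]

theorem slice_one_neg_one {α : Type} (l : List α) :
    PySem.List.slice l (some 1) (some (-1)) = l.tail.dropLast := by
  cases l with
  | nil => rfl
  | cons x xs =>
    simp [PySem.List.slice, List.dropLast_eq_take]

-- ===== VERDICT (by name: the statement is the Claim_ definition above) =====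
theorem get_error_distance_spec : Claim_equal_get_error_distance := by
  intro ds _ hpre
  unfold Spec_get_error_distance get_error_distance get_error_distance_alt
  cases h : ds.lookup "predict_corr" with
  | none => rfl
  | some xs =>
    simp only []
    rw [fold_start xs 0 0 le_rfl]
    rw [splitOn_eq_geaSplit, slice_one_neg_one]
    have hlens : (geaSplit (xs.map gedEnc) [] []).map PySem.Chars.len = geaRuns xs 0 := by
      simpa using geaSplit_lens xs [] []
    have hmap : (geaSplit (xs.map gedEnc) [] []).tail.dropLast.map
        (fun run => PySem.Chars.len run + 1)
        = (((geaRuns xs 0).tail).dropLast).map (· + 1) := by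
      rw [← hlens]
      rw [← List.map_tail, ← List.map_dropLast, List.map_map]
      rfl
    rw [hmap]
    rcases hg : (((geaRuns xs 0).tail).dropLast).map (· + 1) with _ | ⟨y, ys⟩ <;> simp
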